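-- pv_equiv track=rewrite | github.com/Dumitru543/SAT | res_solver.py | resolve_clauses
-- ===== SOURCE A (Python) =====
-- def resolve_clauses(c1, c2):
--     for literal in c1:
--         if -literal in c2:
--             new_clause = set(c1).union(c2)
--             new_clause.discard(literal)
--             new_clause.discard(-literal)
--             if any(-lit in new_clause for lit in new_clause):
--                 return None
--             return frozenset(new_clause)
--     return None
-- ===== SOURCE B (Python) =====
-- def resolve_clauses(c1, c2):
--     s1, s2 = set(c1), set(c2)
--     if not any(-l in s2 for l in s1):
--         return None
--     union = s1 | s2
--     comp = {l for l in union if -l in union}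
--     if len(comp) > 2:
--         return None
--     return frozenset(union - comp)
-- ===== Notes on version B (the rewrite author's own statement) =====
-- stated objective: alternative
-- what changed: B builds the union and an explicit complementary-literal table up front and decides tautology/resolvent by the table's size (>2 means tautology), instead of A's find-first-pivot, discard, then re-scan every remaining literal for a complement.
import Mathlib
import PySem

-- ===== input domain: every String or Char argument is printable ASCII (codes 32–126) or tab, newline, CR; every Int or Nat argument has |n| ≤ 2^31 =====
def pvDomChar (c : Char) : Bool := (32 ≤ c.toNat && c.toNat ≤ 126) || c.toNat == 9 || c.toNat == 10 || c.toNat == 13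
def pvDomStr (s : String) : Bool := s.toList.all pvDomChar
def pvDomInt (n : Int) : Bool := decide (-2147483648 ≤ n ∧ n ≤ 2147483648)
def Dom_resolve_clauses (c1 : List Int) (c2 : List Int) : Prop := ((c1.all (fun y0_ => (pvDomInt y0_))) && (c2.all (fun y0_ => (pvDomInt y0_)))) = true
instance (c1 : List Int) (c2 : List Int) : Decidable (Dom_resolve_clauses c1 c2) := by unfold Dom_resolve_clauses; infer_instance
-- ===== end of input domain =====

-- B replaces A's find-pivot-discard-rescan with an up-front complementary-literal table
-- decided by its size (objective: alternative decomposition, same asymptotic cost).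

-- ===== PORT A =====
-- body of A's loop once '-literal in c2' has fired
def pvBodyA (c1 c2 : List Int) (literal : Int) : Option (List Int) :=
  let u0 := PySem.Set.union (PySem.Set.ofList c1) c2   -- set(c1).union(c2)
  let u1 := PySem.Set.discard u0 literal
  let u2 := PySem.Set.discard u1 (-literal)
  if u2.any (fun lit => u2.contains (-lit)) then none
  else some u2

-- 'for literal in c1: …' of A, structural recursion over the remaining literals
def pvLoopA (c1 c2 : List Int) : List Int → Option (List Int)
  | [] => none
  | literal :: rest =>
    if c2.contains (-literal) then pvBodyA c1 c2 literal
    else pvLoopA c1 c2 rest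

def resolve_clauses (c1 : List Int) (c2 : List Int) : Option (List Int) :=
  pvLoopA c1 c2 c1

-- ===== PORT B =====
def resolve_clauses_alt (c1 : List Int) (c2 : List Int) : Option (List Int) :=
  let s1 := PySem.Set.ofList c1
  let s2 := PySem.Set.ofList c2
  if !(s1.any (fun l => PySem.Set.contains s2 (-l))) then none
  else
    let u := PySem.Set.union s1 s2
    let comp : PySem.Set Int := u.filter (fun l => PySem.Set.contains u (-l))
    if 2 < comp.length then none
    else some (PySem.Set.diff u comp)

-- ===== PRECONDITION & SPEC =====
def Spec_resolve_clauses (c1 : List Int) (c2 : List Int) (out : Option (List Int)) : Prop := out = resolve_clauses_alt c1 c2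
instance (c1 : List Int) (c2 : List Int) (out : Option (List Int)) : Decidable (Spec_resolve_clauses c1 c2 out) := by unfold Spec_resolve_clauses; infer_instance

-- ===== CLAIM (what is proved, stated in full; the proofs are below) =====
def Claim_equal_resolve_clauses : Prop := ∀ (c1 : List Int) (c2 : List Int), Dom_resolve_clauses c1 c2 → Spec_resolve_clauses c1 c2 (resolve_clauses c1 c2)

-- ===== LEMMAS AND PROOFS =====

-- updating a set with set(t) is the same as updating it with t
theorem pv_update_ofList {α : Type} [BEq α] [LawfulBEq α] (t : List α) (s : PySem.Set α) :
    PySem.Set.update s (PySem.Set.ofList t) = PySem.Set.update s t := by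
  induction t using List.reverseRecOn generalizing s with
  | nil => rfl
  | append_singleton t x ih =>
    rw [PySem.Set.ofList_append_singleton]
    by_cases hx : x ∈ PySem.Set.ofList t
    · have h1 : PySem.Set.add (PySem.Set.ofList t) x = PySem.Set.ofList t := by
        simp [PySem.Set.add, hx]
      rw [h1, ih]
      have hxu : x ∈ PySem.Set.update s t := by
        rw [PySem.Set.mem_update]; exact Or.inr ((PySem.Set.mem_ofList _ _).1 hx)
      have h2 : PySem.Set.update s (t ++ [x]) = PySem.Set.add (PySem.Set.update s t) x := by
        simp [PySem.Set.update, List.foldl_append]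
      rw [h2]
      simp [PySem.Set.add, hxu]
    · have h1 : PySem.Set.add (PySem.Set.ofList t) x = PySem.Set.ofList t ++ [x] := by
        simp [PySem.Set.add, hx]
      have h2 : ∀ (r : List α), PySem.Set.update s (r ++ [x]) = PySem.Set.add (PySem.Set.update s r) x := by
        intro r; simp [PySem.Set.update, List.foldl_append]
      rw [h1, h2, h2, ih]

-- small cardinality facts on nodup lists
theorem pv_three_le {l : List Int} (hnd : l.Nodup) {a b c : Int}
    (ha : a ∈ l) (hb : b ∈ l) (hc : c ∈ l)
    (hab : a ≠ b) (hac : a ≠ c) (hbc : b ≠ c) : 3 ≤ l.length := by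
  have hs : ({a, b, c} : Finset Int) ⊆ l.toFinset := by
    intro x hx; simp at hx; rcases hx with rfl | rfl | rfl <;> simpa
  have h2 := Finset.card_le_card hs
  rw [Finset.card_insert_of_notMem (by simp [hab, hac]), Finset.card_pair hbc,
      List.toFinset_card_of_nodup hnd] at h2
  exact h2

theorem pv_le_two {l : List Int} (hnd : l.Nodup) {a b : Int}
    (h : ∀ x ∈ l, x = a ∨ x = b) : l.length ≤ 2 := by
  have hs : l.toFinset ⊆ ({a, b} : Finset Int) := by
    intro x hx; simp at hx; rcases h x hx with rfl | rfl <;> simp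
  have h2 := Finset.card_le_card hs
  rw [List.toFinset_card_of_nodup hnd] at h2
  calc l.length ≤ ({a, b} : Finset Int).card := h2
    _ ≤ 2 := le_trans (Finset.card_insert_le _ _) (by simp)

theorem pv_exists_ne {l : List Int} (hnd : l.Nodup) (h : 1 < l.length) (a : Int) :
    ∃ x ∈ l, x ≠ a := by
  match l, hnd, h with
  | x :: y :: rest, hnd, _ =>
    have hxy : x ≠ y := by
      simp [List.nodup_cons] at hnd; exact fun e => hnd.1.1 (by simp [e])
    by_cases hx : x = a
    · exact ⟨y, by simp, by rw [hx] at hxy; exact fun e => hxy e.symm⟩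
    · exact ⟨x, by simp, hx⟩

-- membership of the complement table when it is within the size bound 2
theorem pv_comp_eq {u : List Int} (hnd : u.Nodup) {p : Int} (hpu : p ∈ u) (hnpu : -p ∈ u)
    (hle : (u.filter (fun l => u.contains (-l))).length ≤ 2) :
    ∀ x, x ∈ u.filter (fun l => u.contains (-l)) ↔ (x = p ∨ x = -p) := by
  set comp := u.filter (fun l => u.contains (-l)) with hcomp
  have hmemc : ∀ x, x ∈ comp ↔ x ∈ u ∧ -x ∈ u := by
    intro x; rw [hcomp]; simp [List.mem_filter]
  have hndc : comp.Nodup := hnd.filter _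
  have hpc : p ∈ comp := (hmemc p).2 ⟨hpu, hnpu⟩
  have hnpc : -p ∈ comp := (hmemc (-p)).2 ⟨hnpu, by simpa using hpu⟩
  intro x
  constructor
  · intro hxc
    by_contra hno
    push Not at hno
    have hxu := (hmemc x).1 hxc
    have hnxc : -x ∈ comp := (hmemc (-x)).2 ⟨hxu.2, by simpa using hxu.1⟩
    by_cases hp0 : p = 0
    · -- comp contains 0 (= p) and the distinct pair x, -x: three elements
      have hx0 : x ≠ 0 := fun e => hno.1 (by rw [e, hp0])
      have := pv_three_le hndc hpc hxc hnxc
        (by rw [hp0]; exact fun e => hx0 e.symm)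
        (by rw [hp0]; intro e; exact hx0 (by omega))
        (by intro e; exact hx0 (by omega))
      omega
    · have := pv_three_le hndc hpc hnpc hxc (by omega)
        (fun e => hno.1 e.symm) (fun e => hno.2 e.symm)
      omega
  · rintro (rfl | rfl)
    · exact hpc
    · exact hnpc

-- the tautology re-scan of A fires exactly when the complement table has more than 2 elements
theorem pv_taut_iff {u : List Int} (hnd : u.Nodup) {p : Int} (hpu : p ∈ u) (hnpu : -p ∈ u) :
    ((PySem.Set.discard (PySem.Set.discard u p) (-p)).any
        (fun lit => List.contains (PySem.Set.discard (PySem.Set.discard u p) (-p)) (-lit)) = true)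
    ↔ 2 < (u.filter (fun l => List.contains u (-l))).length := by
  set v := PySem.Set.discard (PySem.Set.discard u p) (-p) with hv
  set comp := u.filter (fun l => u.contains (-l)) with hcomp
  have hmemv : ∀ x, x ∈ v ↔ x ∈ u ∧ x ≠ p ∧ x ≠ -p := by
    intro x; rw [hv, PySem.Set.mem_discard, PySem.Set.mem_discard]; tauto
  have hmemc : ∀ x, x ∈ comp ↔ x ∈ u ∧ -x ∈ u := by
    intro x; rw [hcomp]; simp [List.mem_filter]
  have hndc : comp.Nodup := hnd.filter _
  have hpc : p ∈ comp := (hmemc p).2 ⟨hpu, hnpu⟩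
  have hnpc : -p ∈ comp := (hmemc (-p)).2 ⟨hnpu, by simpa using hpu⟩
  constructor
  · intro hany
    obtain ⟨l, hlv, hcon⟩ := List.any_eq_true.mp hany
    have hlv' := (hmemv l).1 hlv
    have hnl' : -l ∈ u ∧ -l ≠ p ∧ -l ≠ -p := (hmemv (-l)).1 (by simpa using hcon)
    have hlc : l ∈ comp := (hmemc l).2 ⟨hlv'.1, hnl'.1⟩
    have hnlc : -l ∈ comp := (hmemc (-l)).2 ⟨hnl'.1, by simpa using hlv'.1⟩
    by_cases hp0 : p = 0
    · -- 0 (= p), l, -l are three distinct members of comp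
      have hl0 : l ≠ 0 := by rw [hp0] at hlv'; exact hlv'.2.1
      have := pv_three_le hndc hpc hlc hnlc
        (by rw [hp0]; exact fun e => hl0 e.symm)
        (by rw [hp0]; intro e; exact hl0 (by omega))
        (by intro e; exact hl0 (by omega))
      omega
    · have := pv_three_le hndc hpc hnpc hlc (by omega)
        (Ne.symm hlv'.2.1) (Ne.symm hlv'.2.2)
      omega
  · intro hlt
    obtain ⟨l, hlc, hlp, hlnp⟩ : ∃ l ∈ comp, l ≠ p ∧ l ≠ -p := by
      by_cases hp0 : p = 0
      · obtain ⟨l, hlc, hl0⟩ := pv_exists_ne hndc (by omega) 0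
        exact ⟨l, hlc, by rw [hp0]; exact hl0, by rw [hp0]; simpa using hl0⟩
      · by_contra hno
        push Not at hno
        have := pv_le_two hndc (fun x hx => by
          rcases eq_or_ne x p with h | h
          · exact Or.inl h
          · rcases eq_or_ne x (-p) with h' | h'
            · exact Or.inr h'
            · exact absurd (hno x hx h) h')
        omega
    have hlu := (hmemc l).1 hlc
    refine List.any_eq_true.mpr ⟨l, (hmemv l).2 ⟨hlu.1, hlp, hlnp⟩, ?_⟩
    have hnlv : -l ∈ v :=
      (hmemv (-l)).2 ⟨hlu.2, fun e => hlnp (by omega), fun e => hlp (by omega)⟩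
    simpa using hnlv

theorem pvLoopA_find? (c1 c2 m : List Int) :
    pvLoopA c1 c2 m = match m.find? (fun l => c2.contains (-l)) with
      | none => none
      | some p => pvBodyA c1 c2 p := by
  induction m with
  | nil => rfl
  | cons l rest ih =>
    by_cases h : (-l) ∈ c2 <;> simp [pvLoopA, List.find?, h, ih]

theorem resolve_clauses_eq_alt (c1 c2 : List Int) :
    resolve_clauses c1 c2 = resolve_clauses_alt c1 c2 := by
  rw [resolve_clauses, pvLoopA_find?]
  cases hf : List.find? (fun l => c2.contains (-l)) c1 with
  | none =>
    have hnone : ∀ l ∈ c1, (-l) ∉ c2 := by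
      intro l hl
      have := List.find?_eq_none.mp hf l hl
      simpa using this
    simp [resolve_clauses_alt]
    exact fun x hx hx2 => absurd hx2 (hnone x hx)
  | some p =>
    have hp1 : p ∈ c1 := List.mem_of_find?_eq_some hf
    have hp2 : (-p) ∈ c2 := by simpa using List.find?_some hf
    have hany : (List.any (PySem.Set.ofList c1)
        fun l => List.contains (PySem.Set.ofList c2) (-l)) = true := by
      refine List.any_eq_true.mpr ⟨p, (PySem.Set.mem_ofList _ _).2 hp1, ?_⟩
      simp [PySem.Set.mem_ofList]
      exact hp2
    have hu : PySem.Set.union (PySem.Set.ofList c1) (PySem.Set.ofList c2)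
        = PySem.Set.union (PySem.Set.ofList c1) c2 := pv_update_ofList c2 _
    simp only [resolve_clauses_alt, PySem.Set.contains_eq_listContains, hany, Bool.not_true,
      Bool.false_eq_true, if_false, hu, pvBodyA]
    set u := PySem.Set.union (PySem.Set.ofList c1) c2 with hudef
    have hnd : u.Nodup := PySem.Set.nodup_union (PySem.Set.ofList c1) c2 (PySem.Set.nodup_ofList c1)
    have hmemu : ∀ x : Int, x ∈ u ↔ x ∈ c1 ∨ x ∈ c2 := by
      intro x
      rw [hudef, PySem.Set.mem_union, PySem.Set.mem_ofList]
    have hpu : p ∈ u := (hmemu p).2 (Or.inl hp1)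
    have hnpu : -p ∈ u := (hmemu (-p)).2 (Or.inr hp2)
    by_cases htaut : 2 < (List.filter (fun l => List.contains u (-l)) u).length
    · rw [if_pos ((pv_taut_iff hnd hpu hnpu).mpr htaut), if_pos htaut]
    · have hcm := pv_comp_eq hnd hpu hnpu (Nat.le_of_not_lt htaut)
      have hna : ¬ ((List.any (PySem.Set.discard (PySem.Set.discard u p) (-p))
          fun lit => List.contains (PySem.Set.discard (PySem.Set.discard u p) (-p)) (-lit)) = true) :=
        fun h => htaut ((pv_taut_iff hnd hpu hnpu).mp h)
      have hveq : PySem.Set.discard (PySem.Set.discard u p) (-p)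
          = PySem.Set.diff u (List.filter (fun l => List.contains u (-l)) u) := by
        show (List.filter _ (List.filter _ u)) = List.filter _ u
        rw [List.filter_filter]
        apply List.filter_congr
        intro x hx
        by_cases hxc : x ∈ List.filter (fun l => List.contains u (-l)) u
        · rcases (hcm x).1 hxc with rfl | rfl <;> simp [hpu, hnpu]
        · have hxp : x ≠ p := fun e => hxc ((hcm x).2 (Or.inl e))
          have hxnp : x ≠ -p := fun e => hxc ((hcm x).2 (Or.inr e))
          have hnxu : -x ∉ u := fun hn => hxc (List.mem_filter.mpr ⟨hx, by simpa using hn⟩)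
          simp [hxp, hxnp, hnxu]
      rw [if_neg hna, if_neg htaut, hveq]

-- ===== VERDICT (by name: the statement is the Claim_ definition above) =====
theorem resolve_clauses_spec : Claim_equal_resolve_clauses := by
  intro c1 c2 _
  unfold Spec_resolve_clauses
  exact resolve_clauses_eq_alt c1 c2
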